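-- pv_equiv track=rewrite | github.com/tarkhog25/pychatbot-snoussi-berger | fonctions.py | exctraction_name
-- ===== SOURCE A (Python) =====
-- def exctraction_name(f):
--     """
--
--     :param f: List representing files
--     :return: List of strings representing the name of president
--     """
--     nom_president = []
--     for fichier in f:
--         president = ""
--         for lettre in fichier[11:]:
--             # To take only the part of the string corresponding to the name of a president
--             if (48 <= ord(lettre) <= 57) or (lettre == "."):
--                 break
--             else:
--                 president += lettre
--         if president not in nom_president:
--             nom_president.append(president)
--     return nom_president
-- ===== SOURCE B (Python) =====
-- def extract(fichier):
--     """Name part of one filename: truncate fichier[11:] at the earliest digit or dot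
--     by cutting at the first occurrence of each stop character in turn."""
--     president = fichier[11:]
--     for stop in "0123456789.":
--         cut = president.find(stop)
--         if cut != -1:
--             president = president[:cut]
--     return president
--
--
-- def exctraction_name(f):
--     return list(dict.fromkeys(extract(fichier) for fichier in f))
-- ===== Notes on version B (the rewrite author's own statement) =====
-- stated objective: alternative
-- what changed: Replaces A's char-by-char inner scan with break and its membership-test-append dedup by truncating the tail at the first occurrence of each of the 11 stop characters via str.find, and deduplicating once at the end with dict.fromkeys.
import Mathlib
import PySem

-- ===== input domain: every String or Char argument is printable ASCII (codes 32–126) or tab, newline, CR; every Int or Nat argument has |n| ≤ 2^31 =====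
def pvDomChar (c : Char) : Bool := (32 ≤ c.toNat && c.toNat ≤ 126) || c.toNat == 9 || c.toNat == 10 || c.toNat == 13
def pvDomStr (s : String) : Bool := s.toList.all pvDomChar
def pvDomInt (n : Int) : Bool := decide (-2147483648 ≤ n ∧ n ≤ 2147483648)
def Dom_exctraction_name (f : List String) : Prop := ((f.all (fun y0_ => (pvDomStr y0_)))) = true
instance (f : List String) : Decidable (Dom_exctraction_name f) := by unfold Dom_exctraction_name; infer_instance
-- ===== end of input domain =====

-- B replaces A's char-by-char scan-with-break and membership-append dedup by truncating at the
-- first occurrence of each stop character (str.find) and a single dict.fromkeys dedup (alternative).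

-- ===== PORT A =====
-- inner loop: for lettre in fichier[11:]: break on digit/dot else president += lettre
def pvAInner : List Char → List Char → List Char
  | [], president => president
  | lettre :: rest, president =>
    if (48 ≤ lettre.toNat ∧ lettre.toNat ≤ 57) ∨ lettre = '.' then president
    else pvAInner rest (president ++ [lettre])

def exctraction_name (f : List String) : List String :=
  f.foldl (fun nom_president fichier =>
    let president := String.mk (pvAInner (PySem.List.slice fichier.toList (some 11) none) [])
    if president ∈ nom_president then nom_president else nom_president ++ [president]) []

-- ===== PORT B =====
-- president = president[:cut] at cut = president.find(stop), for each stop in "0123456789."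
def pvCut (president : List Char) (stop : Char) : List Char :=
  let cut := PySem.Chars.find president [stop]
  if cut ≠ -1 then PySem.List.slice president none (some cut) else president

def pvExtract (fichier : String) : String :=
  String.mk (("0123456789.".toList).foldl pvCut (PySem.List.slice fichier.toList (some 11) none))

def exctraction_name_alt (f : List String) : List String :=
  PySem.List.dedup (f.map pvExtract)

-- ===== PRECONDITION & SPEC =====
def Spec_exctraction_name (f : List String) (out : List String) : Prop := out = exctraction_name_alt f
instance (f : List String) (out : List String) : Decidable (Spec_exctraction_name f out) := by unfold Spec_exctraction_name; infer_instance

-- ===== CLAIM (what is proved, stated in full; the proofs are below) =====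
def Claim_equal_exctraction_name : Prop := ∀ (f : List String), Dom_exctraction_name f → Spec_exctraction_name f (exctraction_name f)

-- ===== LEMMAS AND PROOFS =====

-- A's inner loop is takeWhile of the non-stop predicate
theorem pvAInner_eq (cs acc : List Char) :
    pvAInner cs acc = acc ++ cs.takeWhile (fun c => !decide ((48 ≤ c.toNat ∧ c.toNat ≤ 57) ∨ c = '.')) := by
  induction cs generalizing acc with
  | nil => simp [pvAInner]
  | cons c rest ih =>
    by_cases h : (48 ≤ c.toNat ∧ c.toNat ≤ 57) ∨ c = '.'
    · simp [pvAInner, h, List.takeWhile]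
    · simp [pvAInner, h, List.takeWhile, ih]

theorem takeWhile_eq_take_of (p : List Char) (c : Char) (k : Nat) (hk : k < p.length)
    (h2 : p[k] = c) (h3 : ∀ i (hi : i < k), p[i] ≠ c) :
    p.takeWhile (fun x => !(x == c)) = p.take k := by
  induction p generalizing k with
  | nil => simp at hk
  | cons x xs ih =>
    cases k with
    | zero => simp_all [List.takeWhile]
    | succ k' =>
      have hx : x ≠ c := h3 0 (Nat.succ_pos _)
      simp only [List.takeWhile, List.take]
      rw [show (x == c) = false by simp [hx]]
      simp only [Bool.not_false, List.cons.injEq, true_and]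
      exact ih k' (by simpa using hk) (by simpa using h2)
        (fun i hi => by simpa using h3 (i + 1) (by omega))

-- one truncation step = takeWhile (≠ stop)
theorem pvCut_eq (p : List Char) (c : Char) :
    pvCut p c = p.takeWhile (fun x => !(x == c)) := by
  unfold pvCut
  by_cases h : PySem.Chars.find p [c] = -1
  · have hmem : c ∉ p := by
      have := (PySem.Chars.find_eq_neg_one_iff p [c]).mp h
      simpa [List.singleton_infix_iff] using this
    simp only [h, ne_eq, not_true_eq_false, if_false]
    rw [List.takeWhile_eq_self_iff.mpr]
    intro x hx
    simp only [Bool.not_eq_eq_eq_not, Bool.not_true, beq_eq_false_iff_ne, ne_eq]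
    exact fun hxc => hmem (hxc ▸ hx)
  · have hge := PySem.Chars.neg_one_le_find p [c]
    have hpos : 0 ≤ PySem.Chars.find p [c] := by omega
    obtain ⟨hpre, hmin⟩ := PySem.Chars.find_spec hpos
    have hlen := PySem.Chars.find_le_length p [c]
    set k := (PySem.Chars.find p [c]).toNat with hkdef
    have hhead : p[k]? = some c := by
      have h0 : (List.drop k p)[0]? = some c := by
        rcases hpre with ⟨t, ht⟩; rw [← ht]; rfl
      rw [List.getElem?_drop] at h0
      simpa using h0
    have hklt : k < p.length := (List.getElem?_eq_some_iff.mp hhead).1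
    have hkc : p[k] = c := by
      have := List.getElem?_eq_getElem hklt
      rw [this] at hhead; exact Option.some.injEq _ _ ▸ (by simpa using hhead)
    have hne : ∀ i (hi : i < k), p[i] ≠ c := by
      intro i hi hic
      apply hmin i hi
      have hilt : i < p.length := by omega
      have hd : p.drop i = c :: (p.drop i).tail := by
        have hh : (p.drop i).head? = some c := by
          rw [List.head?_drop, List.getElem?_eq_getElem hilt, hic]
        cases hq : p.drop i with
        | nil => rw [hq] at hh; simp at hh
        | cons x xs =>
          rw [hq] at hh
          simp only [List.head?_cons, Option.some.injEq] at hh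
          simp [hh]
      exact ⟨(p.drop i).tail, by rw [List.singleton_append, ← hd]⟩
    simp only [h, ne_eq, not_false_iff, if_true]
    rw [PySem.List.slice_to _ hpos, takeWhile_eq_take_of p c k hklt hkc hne]

theorem foldl_pvCut_eq (S : List Char) (t : List Char) :
    S.foldl pvCut t = t.takeWhile (fun x => !decide (x ∈ S)) := by
  induction S generalizing t with
  | nil =>
    rw [List.foldl_nil]
    exact ((List.takeWhile_eq_self_iff).mpr (by simp)).symm
  | cons s S ih =>
    simp only [List.foldl_cons, ih, pvCut_eq, List.takeWhile_takeWhile]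
    congr 1
    funext x
    by_cases h : x = s <;> simp [h]

theorem stop_pred_eq (c : Char) :
    (decide ((48 ≤ c.toNat ∧ c.toNat ≤ 57) ∨ c = '.')) = decide (c ∈ "0123456789.".toList) := by
  apply decide_eq_decide.mpr
  have htl : "0123456789.".toList = ['0','1','2','3','4','5','6','7','8','9','.'] := rfl
  rw [htl]
  constructor
  · rintro (⟨h1, h2⟩ | rfl)
    · have hc := Char.ofNat_toNat c
      have h10 : c.toNat = 48 ∨ c.toNat = 49 ∨ c.toNat = 50 ∨ c.toNat = 51 ∨ c.toNat = 52 ∨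
          c.toNat = 53 ∨ c.toNat = 54 ∨ c.toNat = 55 ∨ c.toNat = 56 ∨ c.toNat = 57 := by omega
      rcases h10 with h|h|h|h|h|h|h|h|h|h <;> (rw [h] at hc; rw [← hc]; decide)
    · decide
  · intro h
    simp only [List.mem_cons, List.not_mem_nil, or_false] at h
    rcases h with rfl|rfl|rfl|rfl|rfl|rfl|rfl|rfl|rfl|rfl|rfl <;> decide

theorem pvExtract_eq (fichier : String) :
    pvExtract fichier =
      String.mk (pvAInner (PySem.List.slice fichier.toList (some 11) none) []) := by
  rw [pvExtract, foldl_pvCut_eq, pvAInner_eq]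
  congr 1
  simp only [List.nil_append]
  congr 1
  funext c
  rw [stop_pred_eq]

theorem exctraction_name_spec : Claim_equal_exctraction_name := by
  intro f _
  unfold Spec_exctraction_name exctraction_name exctraction_name_alt
  rw [PySem.List.dedup, PySem.Set.ofList, List.foldl_map]
  congr 1
  funext nom_president fichier
  simp [pvExtract_eq, PySem.Set.add, List.contains_eq_mem]
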